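-- pv_equiv track=rewrite | github.com/TMDDraGon/VR-WEB | web/app/views.py | limit_score
-- ===== SOURCE A (Python) =====
-- def limit_score(lap):
--     score_all = 0
--     count = 0
--     for i in range (len(lap)):
--         score = 300
--         if i == 0 or i== 1:
--             if lap[i] == 0:
--                 score = 0
--             elif lap[i] >= 53:
--                 score -= 300
--             elif lap[i] >= 51:
--                 score -= 280
--             elif lap[i] >= 49:
--                 score -= 260
--             elif lap[i] >= 47:
--                 score -= 240
--             elif lap[i] >= 45:
--                 score -= 220
--             elif lap[i] >= 43:
--                 score -= 200
--             elif lap[i] >= 41: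
--                 score -= 150
--             else:
--                 count += 1
--         elif i == 2:
--             if lap[i] == 0:
--                 score = 0
--             elif lap[i] >= 73:
--                 score -= 300
--             elif lap[i] >= 71:
--                 score -= 280
--             elif lap[i] >= 69:
--                 score -= 260
--             elif lap[i] >= 67:
--                 score -= 240
--             elif lap[i] >= 65:
--                 score -= 220
--             elif lap[i] >= 63:
--                 score -= 200
--             elif lap[i] >= 61:
--                 score -= 150
--             else:
--                 count += 1
--
--         score_all += score
--     return score_all,count
-- ===== SOURCE B (Python) =====
-- def _pts(v, base):
--     # closed-form score for one timed lap; base = lowest cutoff (41 or 61)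
--     if v == 0:
--         return 0, 0
--     d = v - base
--     if d < 0:
--         return 300, 1          # under the lowest cutoff: full score, counted
--     if d < 2:
--         return 150, 0          # [base, base+2): the single non-linear step
--     return max(0, 100 - 20 * ((d - 2) // 2)), 0   # linear 20-point drop per 2s
--
-- def limit_score(lap):
--     total = 300 * max(0, len(lap) - 3)   # laps beyond the third score a flat 300
--     count = 0
--     for v, base in zip(lap[:3], (41, 41, 61)):
--         s, m = _pts(v, base)
--         total += s
--         count += m
--     return total, count
-- ===== Notes on version B (the rewrite author's own statement) =====
-- stated objective: simpler
-- what changed: Replaces the two duplicated 8-branch if/elif ladders and the per-index loop over the whole list by a closed-form arithmetic score formula (max(0, 100 - 20*((v-base-2)//2))) applied only to the first three laps zipped with their base cutoffs, with all laps beyond the third summed by one multiplication 300*(len-3).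
import Mathlib
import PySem

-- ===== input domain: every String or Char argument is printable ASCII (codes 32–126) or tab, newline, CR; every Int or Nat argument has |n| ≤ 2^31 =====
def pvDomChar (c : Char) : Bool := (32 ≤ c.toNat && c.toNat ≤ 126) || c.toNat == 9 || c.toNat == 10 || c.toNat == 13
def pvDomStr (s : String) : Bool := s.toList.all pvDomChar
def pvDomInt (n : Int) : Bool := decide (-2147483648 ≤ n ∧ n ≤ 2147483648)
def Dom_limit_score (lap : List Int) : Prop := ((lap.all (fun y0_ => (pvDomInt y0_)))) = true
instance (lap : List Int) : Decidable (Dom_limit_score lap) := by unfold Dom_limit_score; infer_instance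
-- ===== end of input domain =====

-- B replaces A's two duplicated 8-branch if/elif ladders and index loop by a closed-form
-- arithmetic score formula over the first three laps, with the tail summed by one
-- multiplication (objective: simpler).

-- ===== PORT A =====
def limit_score (lap : List Int) : Int × Int :=
  (List.range lap.length).foldl (fun (st : Int × Int) (i : Nat) =>
    let score : Int := 300
    let v := lap.getD i 0
    let sc : Int × Int :=
      if i == 0 || i == 1 then
        if v == 0 then (0, st.2)
        else if v ≥ 53 then (score - 300, st.2)
        else if v ≥ 51 then (score - 280, st.2)
        else if v ≥ 49 then (score - 260, st.2)
        else if v ≥ 47 then (score - 240, st.2)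
        else if v ≥ 45 then (score - 220, st.2)
        else if v ≥ 43 then (score - 200, st.2)
        else if v ≥ 41 then (score - 150, st.2)
        else (score, st.2 + 1)
      else if i == 2 then
        if v == 0 then (0, st.2)
        else if v ≥ 73 then (score - 300, st.2)
        else if v ≥ 71 then (score - 280, st.2)
        else if v ≥ 69 then (score - 260, st.2)
        else if v ≥ 67 then (score - 240, st.2)
        else if v ≥ 65 then (score - 220, st.2)
        else if v ≥ 63 then (score - 200, st.2)
        else if v ≥ 61 then (score - 150, st.2)
        else (score, st.2 + 1)
      else (score, st.2)
    (st.1 + sc.1, sc.2)) (0, 0)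

-- ===== PORT B =====
def pvPts (v base : Int) : Int × Int :=
  if v == 0 then (0, 0)
  else
    let d := v - base
    if d < 0 then (300, 1)
    else if d < 2 then (150, 0)
    else (max 0 (100 - 20 * PySem.Int.floordiv (d - 2) 2), 0)

def limit_score_alt (lap : List Int) : Int × Int :=
  let total0 : Int := 300 * max 0 ((lap.length : Int) - 3)
  ((lap.take 3).zip [41, 41, 61]).foldl
    (fun (st : Int × Int) (vb : Int × Int) =>
      let p := pvPts vb.1 vb.2
      (st.1 + p.1, st.2 + p.2)) (total0, 0)

-- ===== PRECONDITION & SPEC =====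
def Spec_limit_score (lap : List Int) (out : Int × Int) : Prop := out = limit_score_alt lap
instance (lap : List Int) (out : Int × Int) : Decidable (Spec_limit_score lap out) := by unfold Spec_limit_score; infer_instance

-- ===== CLAIM =====
def Claim_equal_limit_score : Prop := ∀ (lap : List Int), Dom_limit_score lap → Spec_limit_score lap (limit_score lap)

-- ===== LEMMAS AND PROOFS =====
set_option maxHeartbeats 1000000

-- the closed-form arithmetic score equals the comparison ladder
theorem pvPts_spec (v base : Int) : pvPts v base =
    (if v == 0 then ((0 : Int), (0 : Int))
     else if v ≥ base + 12 then (0, 0)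
     else if v ≥ base + 10 then (20, 0)
     else if v ≥ base + 8 then (40, 0)
     else if v ≥ base + 6 then (60, 0)
     else if v ≥ base + 4 then (80, 0)
     else if v ≥ base + 2 then (100, 0)
     else if v ≥ base then (150, 0)
     else (300, 1)) := by
  by_cases hz : v == 0
  · simp [pvPts, hz]
  · have regions : (v ≥ base + 12) ∨ (v ≥ base + 10 ∧ ¬v ≥ base + 12) ∨
        (v ≥ base + 8 ∧ ¬v ≥ base + 10) ∨ (v ≥ base + 6 ∧ ¬v ≥ base + 8) ∨
        (v ≥ base + 4 ∧ ¬v ≥ base + 6) ∨ (v ≥ base + 2 ∧ ¬v ≥ base + 4) ∨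
        (v ≥ base ∧ ¬v ≥ base + 2) ∨ (¬v ≥ base) := by omega
    rcases regions with h | ⟨h, h'⟩ | ⟨h, h'⟩ | ⟨h, h'⟩ | ⟨h, h'⟩ | ⟨h, h'⟩ | ⟨h, h'⟩ | h
    · have hq : 5 ≤ PySem.Int.floordiv (v - base - 2) 2 := by
        rw [PySem.Int.floordiv_eq_ediv_of_pos (by omega)]; omega
      simp only [pvPts, hz, Bool.false_eq_true, if_false]
      have h0 : ¬ v - base < 0 := by omega
      have h2 : ¬ v - base < 2 := by omega
      simp only [h0, h2, if_false]
      have hmax : max 0 (100 - 20 * PySem.Int.floordiv (v - base - 2) 2) = 0 := by omega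
      simp only [hmax]
      simp [h]
    all_goals first
    | · have hq : PySem.Int.floordiv (v - base - 2) 2 = 4 := by
          rw [PySem.Int.floordiv_eq_ediv_of_pos (by omega)]; omega
        simp only [pvPts, hz, Bool.false_eq_true, if_false]
        have h0 : ¬ v - base < 0 := by omega
        have h2 : ¬ v - base < 2 := by omega
        simp only [h0, h2, if_false, hq]
        norm_num [h, h']
    | skip
    · have hq : PySem.Int.floordiv (v - base - 2) 2 = 3 := by
        rw [PySem.Int.floordiv_eq_ediv_of_pos (by omega)]; omega
      simp only [pvPts, hz, Bool.false_eq_true, if_false]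
      have h0 : ¬ v - base < 0 := by omega
      have h2 : ¬ v - base < 2 := by omega
      simp only [h0, h2, if_false, hq]
      have n12 : ¬ v ≥ base + 12 := by omega
      have n10 : ¬ v ≥ base + 10 := by omega
      norm_num [h, h', n12, n10]
    · have hq : PySem.Int.floordiv (v - base - 2) 2 = 2 := by
        rw [PySem.Int.floordiv_eq_ediv_of_pos (by omega)]; omega
      simp only [pvPts, hz, Bool.false_eq_true, if_false]
      have h0 : ¬ v - base < 0 := by omega
      have h2 : ¬ v - base < 2 := by omega
      simp only [h0, h2, if_false, hq]
      have n12 : ¬ v ≥ base + 12 := by omega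
      have n10 : ¬ v ≥ base + 10 := by omega
      have n8 : ¬ v ≥ base + 8 := by omega
      norm_num [h, h', n12, n10, n8]
    · have hq : PySem.Int.floordiv (v - base - 2) 2 = 1 := by
        rw [PySem.Int.floordiv_eq_ediv_of_pos (by omega)]; omega
      simp only [pvPts, hz, Bool.false_eq_true, if_false]
      have h0 : ¬ v - base < 0 := by omega
      have h2 : ¬ v - base < 2 := by omega
      simp only [h0, h2, if_false, hq]
      have n12 : ¬ v ≥ base + 12 := by omega
      have n10 : ¬ v ≥ base + 10 := by omega
      have n8 : ¬ v ≥ base + 8 := by omega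
      have n6 : ¬ v ≥ base + 6 := by omega
      norm_num [h, h', n12, n10, n8, n6]
    · have hq : PySem.Int.floordiv (v - base - 2) 2 = 0 := by
        rw [PySem.Int.floordiv_eq_ediv_of_pos (by omega)]; omega
      simp only [pvPts, hz, Bool.false_eq_true, if_false]
      have h0 : ¬ v - base < 0 := by omega
      have h2 : ¬ v - base < 2 := by omega
      simp only [h0, h2, if_false, hq]
      have n12 : ¬ v ≥ base + 12 := by omega
      have n10 : ¬ v ≥ base + 10 := by omega
      have n8 : ¬ v ≥ base + 8 := by omega
      have n6 : ¬ v ≥ base + 6 := by omega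
      have n4 : ¬ v ≥ base + 4 := by omega
      norm_num [h, h', n12, n10, n8, n6, n4]
    · simp only [pvPts, hz, Bool.false_eq_true, if_false]
      have h0 : ¬ v - base < 0 := by omega
      have h2 : v - base < 2 := by omega
      have n12 : ¬ v ≥ base + 12 := by omega
      have n10 : ¬ v ≥ base + 10 := by omega
      have n8 : ¬ v ≥ base + 8 := by omega
      have n6 : ¬ v ≥ base + 6 := by omega
      have n4 : ¬ v ≥ base + 4 := by omega
      have n2 : ¬ v ≥ base + 2 := by omega
      norm_num [h, h0, h2, n12, n10, n8, n6, n4, n2]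
    · simp only [pvPts, hz, Bool.false_eq_true, if_false]
      have h0 : v - base < 0 := by omega
      have n12 : ¬ v ≥ base + 12 := by omega
      have n10 : ¬ v ≥ base + 10 := by omega
      have n8 : ¬ v ≥ base + 8 := by omega
      have n6 : ¬ v ≥ base + 6 := by omega
      have n4 : ¬ v ≥ base + 4 := by omega
      have n2 : ¬ v ≥ base + 2 := by omega
      have n0 : ¬ v ≥ base := by omega
      norm_num [h, h0, n12, n10, n8, n6, n4, n2, n0]

-- getD on literal small indices
theorem getD0 (x : Int) (l : List Int) : (x :: l).getD 0 0 = x := rfl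
theorem getD1 (x y : Int) (l : List Int) : (x :: y :: l).getD 1 0 = y := rfl
theorem getD2 (x y z : Int) (l : List Int) : (x :: y :: z :: l).getD 2 0 = z := rfl

-- A's i in {0,1} ladder equals the closed form with base 41
theorem pts0 (v y : Int) :
    (if v == 0 then ((0 : Int), y)
     else if v ≥ 53 then ((300 : Int) - 300, y)
     else if v ≥ 51 then (300 - 280, y)
     else if v ≥ 49 then (300 - 260, y)
     else if v ≥ 47 then (300 - 240, y)
     else if v ≥ 45 then (300 - 220, y)
     else if v ≥ 43 then (300 - 200, y)
     else if v ≥ 41 then (300 - 150, y)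
     else (300, y + 1))
    = ((pvPts v 41).1, y + (pvPts v 41).2) := by
  rw [pvPts_spec]
  norm_num
  split_ifs <;> simp

-- A's i=2 ladder equals the closed form with base 61
theorem pts2 (v y : Int) :
    (if v == 0 then ((0 : Int), y)
     else if v ≥ 73 then ((300 : Int) - 300, y)
     else if v ≥ 71 then (300 - 280, y)
     else if v ≥ 69 then (300 - 260, y)
     else if v ≥ 67 then (300 - 240, y)
     else if v ≥ 65 then (300 - 220, y)
     else if v ≥ 63 then (300 - 200, y)
     else if v ≥ 61 then (300 - 150, y)
     else (300, y + 1))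
    = ((pvPts v 61).1, y + (pvPts v 61).2) := by
  rw [pvPts_spec]
  norm_num
  split_ifs <;> simp

-- laps past the third all score a flat 300 in A (fold over range' s m, 3 ≤ s)
theorem A_tail (lap : List Int) (m : Nat) : ∀ (s : Nat) (st : Int × Int), 3 ≤ s →
    (List.range' s m).foldl (fun (st : Int × Int) (i : Nat) =>
      let score : Int := 300
      let v := lap.getD i 0
      let sc : Int × Int :=
        if i == 0 || i == 1 then
          if v == 0 then (0, st.2)
          else if v ≥ 53 then (score - 300, st.2)
          else if v ≥ 51 then (score - 280, st.2)
          else if v ≥ 49 then (score - 260, st.2)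
          else if v ≥ 47 then (score - 240, st.2)
          else if v ≥ 45 then (score - 220, st.2)
          else if v ≥ 43 then (score - 200, st.2)
          else if v ≥ 41 then (score - 150, st.2)
          else (score, st.2 + 1)
        else if i == 2 then
          if v == 0 then (0, st.2)
          else if v ≥ 73 then (score - 300, st.2)
          else if v ≥ 71 then (score - 280, st.2)
          else if v ≥ 69 then (score - 260, st.2)
          else if v ≥ 67 then (score - 240, st.2)
          else if v ≥ 65 then (score - 220, st.2)
          else if v ≥ 63 then (score - 200, st.2)
          else if v ≥ 61 then (score - 150, st.2)
          else (score, st.2 + 1)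
        else (score, st.2)
      (st.1 + sc.1, sc.2)) st = (st.1 + 300 * m, st.2) := by
  induction m with
  | zero => intro s st _; simp
  | succ n ih =>
    intro s st hs
    rw [List.range'_succ, List.foldl_cons]
    have h0 : (s == 0) = false := by simp; omega
    have h1 : (s == 1) = false := by simp; omega
    have h2 : (s == 2) = false := by simp; omega
    simp only [h0, h1, h2, Bool.or_self, Bool.false_eq_true, if_false]
    rw [ih (s + 1) _ (by omega)]
    exact Prod.ext (by push_cast [List.length_cons]; ring) rfl

-- ===== VERDICT =====
theorem limit_score_spec : Claim_equal_limit_score := by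
  intro lap _
  unfold Spec_limit_score
  match lap with
  | [] => rfl
  | [a] =>
    show limit_score [a] = limit_score_alt [a]
    unfold limit_score limit_score_alt
    simp only [List.length_cons, List.length_nil, List.range_succ, List.range_zero,
      List.nil_append, List.cons_append, List.take, List.zip, List.zipWith,
      List.foldl_cons, List.foldl_nil, reduceIte, getD0, getD1, getD2, pts0, pts2]
    refine Prod.ext ?_ ?_ <;> simp <;> push_cast <;> ring
  | [a, b] =>
    show limit_score [a, b] = limit_score_alt [a, b]
    unfold limit_score limit_score_alt
    simp only [List.length_cons, List.length_nil, List.range_succ, List.range_zero,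
      List.nil_append, List.cons_append, List.take, List.zip, List.zipWith,
      List.foldl_cons, List.foldl_nil, reduceIte, getD0, getD1, getD2, pts0, pts2]
    refine Prod.ext ?_ ?_ <;> simp <;> push_cast <;> ring
  | a :: b :: c :: rest =>
    show limit_score (a :: b :: c :: rest) = limit_score_alt (a :: b :: c :: rest)
    unfold limit_score limit_score_alt
    have hlen : (a :: b :: c :: rest).length = 3 + rest.length := by simp; omega
    have hr : List.range (3 + rest.length) = [0, 1, 2] ++ List.range' 3 rest.length := by
      rw [List.range_eq_range', ← List.range'_append]
      rfl
    rw [hlen, hr, List.foldl_append]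
    rw [A_tail (a :: b :: c :: rest) rest.length 3 _ (by omega)]
    simp only [List.take, List.zip, List.zipWith, List.foldl_cons, List.foldl_nil,
      reduceIte, getD0, getD1, getD2, pts0, pts2]
    refine Prod.ext ?_ ?_ <;> simp <;> push_cast <;> ring
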